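-- pv_equiv track=rewrite | github.com/Pr123beep/CleaningYourTempFiles | clean_temp.py | find_earliest_on_time
-- ===== SOURCE A (Python) =====
-- def find_earliest_on_time(t, test_cases):
--     results = []
--
--     for n, k, a in test_cases:
--         # Normalize installation times to modulo 2k
--         mods = [ai % (2 * k) for ai in a]
--
--         # Calculate the lowest common time that satisfies the conditions for all rooms
--         max_mod = max(mods)  # Start checking from the largest mod as it's the minimum possible time
--         time = max_mod
--         found = False
--
--         # We will check for the synchronization of light on times within the limit
--         while time <= 2 * k * 10 ** 6:  # Arbitrary large number for upper bound in reasonable range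
--             # Check if this time matches light 'on' time for all rooms
--             if all((time - mod) % (2 * k) == 0 for mod in mods):
--                 results.append(time)
--                 found = True
--                 break
--             time += 2 * k
--
--         if not found:
--             results.append(-1)
--
--     return results
-- ===== SOURCE B (Python) =====
-- def find_earliest_on_time(t, test_cases):
--     # Closed form of A's search: the loop's all-equal check is invariant under
--     # time += 2k, so the answer is max(mods) exactly when all mods coincide and
--     # that value lies within A's search bound 2*k*10**6; otherwise -1.
--     results = []
--     for n, k, a in test_cases:
--         mods = [ai % (2 * k) for ai in a]
--         m = max(mods)
--         results.append(m if all(x == m for x in mods) and m <= 2 * k * 10 ** 6 else -1)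
--     return results
-- ===== Notes on version B (the rewrite author's own statement) =====
-- stated objective: faster
-- what changed: Replaces A's up-to-10^6-step scan over candidate times with a closed-form check: since the loop condition is invariant under time += 2k, the answer is max(mods) iff all residues coincide (and lie within A's search bound), else -1.
import Mathlib
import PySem

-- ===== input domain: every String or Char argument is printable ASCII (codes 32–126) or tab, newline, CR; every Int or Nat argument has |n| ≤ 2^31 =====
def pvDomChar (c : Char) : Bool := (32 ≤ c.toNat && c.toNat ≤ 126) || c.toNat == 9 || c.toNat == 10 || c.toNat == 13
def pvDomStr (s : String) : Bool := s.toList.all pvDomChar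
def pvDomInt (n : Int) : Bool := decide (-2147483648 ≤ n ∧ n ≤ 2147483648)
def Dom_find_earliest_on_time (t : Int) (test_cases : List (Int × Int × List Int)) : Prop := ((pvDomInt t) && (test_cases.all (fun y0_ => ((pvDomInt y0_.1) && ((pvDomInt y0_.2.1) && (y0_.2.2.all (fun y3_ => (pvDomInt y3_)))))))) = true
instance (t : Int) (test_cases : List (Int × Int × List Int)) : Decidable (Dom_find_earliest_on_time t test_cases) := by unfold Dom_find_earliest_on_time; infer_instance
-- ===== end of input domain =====

-- B replaces A's up-to-10^6-step scan by a closed-form check (the loop condition is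
-- time-invariant); objective: faster (drops the fixed-length scan), exact equivalence on Pre_.

-- ===== PORT A =====
-- the loop's all(...) check
def pvCondA (twok time : Int) (mods : List Int) : Bool :=
  mods.all (fun m => PySem.Int.mod (time - m) twok == 0)

-- the 'while time <= 2*k*10**6' search; fuel only bounds the recursion (the loop body
-- runs at most 10^6 + 1 times when it is entered at all, since then 0 ≤ time < twok)
def pvLoopA (fuel : Nat) (twok bound : Int) (mods : List Int) (time : Int) : Option Int :=
  match fuel with
  | 0 => none
  | fuel + 1 =>
    if time ≤ bound then
      if pvCondA twok time mods then some time
      else pvLoopA fuel twok bound mods (time + twok)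
    else none

def pvCaseA (k : Int) (a : List Int) : Int :=
  let twok := 2 * k
  let mods := a.map (fun ai => PySem.Int.mod ai twok)
  match PySem.List.max? mods (fun y => y) with
  | none => 0  -- unreachable under Pre_ (Python's max raises ValueError on empty a)
  | some max_mod =>
    match pvLoopA (10 ^ 6 + 2) twok (twok * 10 ^ 6) mods max_mod with
    | some time => time
    | none => -1

def find_earliest_on_time (t : Int) (test_cases : List (Int × Int × List Int)) : List Int :=
  test_cases.foldl (fun results c => results ++ [pvCaseA c.2.1 c.2.2]) []

-- ===== PORT B =====
def pvCaseB (k : Int) (a : List Int) : Int :=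
  let twok := 2 * k
  let mods := a.map (fun ai => PySem.Int.mod ai twok)
  match PySem.List.max? mods (fun y => y) with
  | none => 0  -- unreachable under Pre_ (Python's max raises ValueError on empty a)
  | some m => if mods.all (fun x => x == m) && decide (m ≤ twok * 10 ^ 6) then m else -1

def find_earliest_on_time_alt (t : Int) (test_cases : List (Int × Int × List Int)) : List Int :=
  test_cases.map (fun c => pvCaseB c.2.1 c.2.2)

-- ===== PRECONDITION & SPEC =====
-- Pre_ excludes exactly the inputs where Python A raises: a case with k = 0
-- (ZeroDivisionError in ai % (2*k)) or with empty a (ValueError in max(mods)).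
def Pre_find_earliest_on_time (t : Int) (test_cases : List (Int × Int × List Int)) : Prop :=
  ∀ c ∈ test_cases, c.2.1 ≠ 0 ∧ c.2.2 ≠ []
instance (t : Int) (test_cases : List (Int × Int × List Int)) : Decidable (Pre_find_earliest_on_time t test_cases) := by unfold Pre_find_earliest_on_time; infer_instance

def pvWitness_find_earliest_on_time : Int × (List (Int × Int × List Int)) :=
  (2, [(3, 2, [3, 7, 11]), (2, 2, [3, 4]), (1, -2, [5])])

def Spec_find_earliest_on_time (t : Int) (test_cases : List (Int × Int × List Int)) (out : List Int) : Prop := out = find_earliest_on_time_alt t test_cases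
instance (t : Int) (test_cases : List (Int × Int × List Int)) (out : List Int) : Decidable (Spec_find_earliest_on_time t test_cases out) := by unfold Spec_find_earliest_on_time; infer_instance

-- ===== CLAIM (what is proved, stated in full; the proofs are below) =====
def Claim_equal_find_earliest_on_time : Prop := ∀ (t : Int) (test_cases : List (Int × Int × List Int)), Dom_find_earliest_on_time t test_cases → Pre_find_earliest_on_time t test_cases → Spec_find_earliest_on_time t test_cases (find_earliest_on_time t test_cases)

-- ===== LEMMAS AND PROOFS =====

-- shifting by one period preserves divisibility of the offset
theorem pvModShift (z y x : Int) :
    PySem.Int.mod (z + y - x) y = 0 ↔ PySem.Int.mod (z - x) y = 0 := by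
  rw [PySem.Int.mod_eq_zero_iff_dvd, PySem.Int.mod_eq_zero_iff_dvd]
  constructor
  · intro h
    have he : z - x = (z + y - x) - y := by ring
    rw [he]; exact h.sub dvd_rfl
  · intro h
    have he : z + y - x = (z - x) + y := by ring
    rw [he]; exact h.add dvd_rfl

-- the loop condition is invariant under time += twok
theorem pvCondA_step (twok time : Int) (mods : List Int) :
    pvCondA twok (time + twok) mods = pvCondA twok time mods := by
  unfold pvCondA
  rw [Bool.eq_iff_iff]
  simp only [List.all_eq_true, beq_iff_eq]
  constructor <;> intro h m hm
  · exact (pvModShift time twok m).mp (h m hm)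
  · exact (pvModShift time twok m).mpr (h m hm)

-- if the condition is false at the start, the loop never succeeds
theorem pvLoopA_none (fuel : Nat) (twok bound : Int) (mods : List Int) (time : Int)
    (h : pvCondA twok time mods = false) :
    pvLoopA fuel twok bound mods time = none := by
  induction fuel generalizing time with
  | zero => rfl
  | succ f ih =>
    unfold pvLoopA
    rw [h]
    simp only [Bool.false_eq_true, if_false]
    rw [ih (time + twok) (by rw [pvCondA_step]; exact h)]
    split <;> rfl

-- per-case equality under k ≠ 0, a ≠ []
theorem pvCase_eq (k : Int) (a : List Int) (hk : k ≠ 0) (_ha : a ≠ []) :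
    pvCaseA k a = pvCaseB k a := by
  have htwok0 : (2 * k : Int) ≠ 0 := fun h => hk (by omega)
  simp only [pvCaseA, pvCaseB]
  have hrange : ∀ y ∈ a.map (fun ai => PySem.Int.mod ai (2 * k)),
      (0 < 2 * k → 0 ≤ y ∧ y < 2 * k) ∧ (2 * k < 0 → 2 * k < y ∧ y ≤ 0) := by
    intro y hy
    rw [List.mem_map] at hy
    obtain ⟨ai, _, rfl⟩ := hy
    exact ⟨fun hp => ⟨PySem.Int.mod_nonneg ai hp, PySem.Int.mod_lt ai hp⟩,
           fun hn => PySem.Int.mod_neg_bounds ai hn⟩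
  generalize hmodsEq : List.map (fun ai => PySem.Int.mod ai (2 * k)) a = mods
  rw [hmodsEq] at hrange
  cases hmax : PySem.List.max? mods (fun y => y) with
  | none => rfl
  | some m =>
    simp only []
    have hmem : m ∈ mods := PySem.List.max?_mem hmax
    have hle : ∀ y ∈ mods, y ≤ m := fun y hy => PySem.List.max?_isMax hmax y hy
    -- the loop condition at time = m holds iff all residues equal m
    have hcond : pvCondA (2 * k) m mods = mods.all (fun x => x == m) := by
      unfold pvCondA
      rw [Bool.eq_iff_iff]
      simp only [List.all_eq_true, beq_iff_eq]
      constructor <;> intro h y hy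
      · obtain ⟨c, hc⟩ := (PySem.Int.mod_eq_zero_iff_dvd _ _).mp (h y hy)
        have h1 := hrange y hy
        have h2 := hrange m hmem
        have hym := hle y hy
        have hc0 : c = 0 := by
          rcases lt_or_gt_of_ne htwok0 with hneg | hpos
          · have hb1 := h1.2 hneg; have hb2 := h2.2 hneg
            nlinarith [hc, hb1.1, hb1.2, hb2.1, hb2.2, hym]
          · have hb1 := h1.1 hpos; have hb2 := h2.1 hpos
            nlinarith [hc, hb1.1, hb1.2, hb2.1, hb2.2, hym]
        rw [hc0, mul_zero] at hc
        omega
      · rw [h y hy]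
        rw [PySem.Int.mod_eq_zero_iff_dvd]
        simp
    cases hall : mods.all (fun x => x == m) with
    | true =>
      rw [hall] at hcond
      by_cases hb : m ≤ 2 * k * 10 ^ 6
      · have hloop : pvLoopA (10 ^ 6 + 2) (2 * k) (2 * k * 10 ^ 6) mods m = some m := by
          unfold pvLoopA
          rw [if_pos hb, hcond]
          rfl
        rw [hloop]
        norm_num at hb ⊢
        simp [hb]
      · have hloop : pvLoopA (10 ^ 6 + 2) (2 * k) (2 * k * 10 ^ 6) mods m = none := by
          unfold pvLoopA
          rw [if_neg hb]
        rw [hloop]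
        norm_num at hb ⊢
        simp [hb]
    | false =>
      rw [hall] at hcond
      rw [pvLoopA_none _ _ _ _ _ hcond]
      simp

-- foldl-append accumulation is map
theorem pvFoldl_append_map (l : List (Int × Int × List Int)) (acc : List Int) :
    l.foldl (fun results c => results ++ [pvCaseA c.2.1 c.2.2]) acc
      = acc ++ l.map (fun c => pvCaseA c.2.1 c.2.2) := by
  induction l generalizing acc with
  | nil => simp
  | cons c l ih => simp [List.foldl_cons, ih]

-- ===== VERDICT (by name: the statement is the Claim_ definition above) =====
theorem find_earliest_on_time_spec : Claim_equal_find_earliest_on_time := by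
  intro t test_cases _ hpre
  unfold Spec_find_earliest_on_time find_earliest_on_time find_earliest_on_time_alt
  rw [pvFoldl_append_map]
  simp only [List.nil_append]
  exact List.map_congr_left fun c hc =>
    pvCase_eq c.2.1 c.2.2 (hpre c hc).1 (hpre c hc).2
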